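-- pv_equiv track=rewrite | github.com/xznhj8129/uav_protocol_experiments | low_level_protocol/test_protocol.py | decode_address
-- ===== SOURCE A (Python) =====
-- def decode_address(addr_int: int, schema: list) -> tuple:
--     """
--     Decode a integer into a tuple of address segments
--     based on the provided schema (list of bit lengths that sum to 16).
--     """
--     if (len(schema) > 1 and sum(schema) != 16) or (len(schema) == 1 and sum(schema) != 20):
--         raise ValueError("Address space overflow")
--
--     segments = []
--     shift = 20 if len(schema) == 1 else 16
--     for bits in schema:
--         shift -= bits
--         seg = (addr_int >> shift) & ((1 << bits) - 1)
--         segments.append(seg)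
--     return tuple(segments)
-- ===== SOURCE B (Python) =====
-- def _segments(v: int, sch: list) -> tuple:
--     # Recursively decode: last segment is the low bits of v,
--     # the rest are decoded from v shifted down by that width.
--     if not sch:
--         return ()
--     last = sch[-1]
--     return _segments(v >> last, sch[:-1]) + (v & ((1 << last) - 1),)
--
--
-- def decode_address(addr_int: int, schema: list) -> tuple:
--     """
--     Decode a integer into a tuple of address segments
--     based on the provided schema (list of bit lengths that sum to 16).
--     """
--     if (len(schema) > 1 and sum(schema) != 16) or (len(schema) == 1 and sum(schema) != 20):
--         raise ValueError("Address space overflow")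
--
--     return _segments(addr_int, schema)
-- ===== Notes on version B (the rewrite author's own statement) =====
-- stated objective: alternative
-- what changed: B replaces A's iterative loop with a decreasing absolute shift variable by a recursion that peels the LAST schema entry each step, masking the low bits of a running remainder and shifting it down, concatenating the recursive result for the front of the schema.
import Mathlib
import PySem

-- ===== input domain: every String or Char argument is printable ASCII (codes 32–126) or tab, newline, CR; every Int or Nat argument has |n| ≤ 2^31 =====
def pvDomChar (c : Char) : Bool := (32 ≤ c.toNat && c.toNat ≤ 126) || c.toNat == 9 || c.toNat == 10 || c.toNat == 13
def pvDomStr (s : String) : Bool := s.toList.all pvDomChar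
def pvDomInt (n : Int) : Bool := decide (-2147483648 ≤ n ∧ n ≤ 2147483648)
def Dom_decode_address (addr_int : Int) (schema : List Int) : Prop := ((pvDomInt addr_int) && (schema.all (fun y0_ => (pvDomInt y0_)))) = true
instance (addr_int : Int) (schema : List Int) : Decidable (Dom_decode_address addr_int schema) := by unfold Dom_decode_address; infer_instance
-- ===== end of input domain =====

-- B decodes by recursion peeling the LAST schema entry (mask low bits of a running remainder,
-- shift it down, recurse on the front) instead of A's loop with a decreasing absolute shift;
-- objective: alternative decomposition, same cost.


-- ===== PORT A =====
-- loop body of A: shift -= bits; seg = (addr_int >> shift) & ((1 << bits) - 1); segments.append(seg)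
def stepA (addr_int : Int) (st : Int × List Int) (bits : Int) : Int × List Int :=
  let shift := st.1 - bits
  (shift, st.2 ++ [PySem.Int.band (addr_int >>> shift.toNat) ((1 <<< bits.toNat) - 1)])

-- the ValueError guard of A is excluded by Pre_decode_address below
def decode_address (addr_int : Int) (schema : List Int) : List Int :=
  let shift : Int := if schema.length == 1 then 20 else 16
  (schema.foldl (stepA addr_int) (shift, [])).2

-- ===== PORT B =====
-- _segments(v, sch): if sch empty return []; else recurse on sch[:-1] with v >> sch[-1],
-- then append v & ((1 << sch[-1]) - 1)
def segmentsB (v : Int) (sch : List Int) : List Int :=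
  match h : sch.getLast? with
  | none => []
  | some last =>
      segmentsB (v >>> last.toNat) sch.dropLast ++ [PySem.Int.band v ((1 <<< last.toNat) - 1)]
termination_by sch.length
decreasing_by
  have hne : sch ≠ [] := by intro hnil; simp [hnil] at h
  have h1 : sch.dropLast.length = sch.length - 1 := List.length_dropLast
  have hpos : 0 < sch.length := List.length_pos_of_ne_nil hne
  omega

def decode_address_alt (addr_int : Int) (schema : List Int) : List Int :=
  segmentsB addr_int schema

-- ===== PRECONDITION & SPEC =====
-- Pre_ excludes exactly the inputs where the Python raises ValueError: the explicit guard
-- (len>1 with sum≠16, or len==1 with sum≠20), and negative bit lengths (negative shift count).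
def Pre_decode_address (addr_int : Int) (schema : List Int) : Prop :=
  ¬ ((schema.length > 1 ∧ schema.sum ≠ 16) ∨ (schema.length = 1 ∧ schema.sum ≠ 20)) ∧
  ∀ b ∈ schema, 0 ≤ b
instance (addr_int : Int) (schema : List Int) : Decidable (Pre_decode_address addr_int schema) := by
  unfold Pre_decode_address; infer_instance

def pvWitness_decode_address : Int × List Int := (43981, [4, 4, 4, 4])

def Spec_decode_address (addr_int : Int) (schema : List Int) (out : List Int) : Prop := out = decode_address_alt addr_int schema
instance (addr_int : Int) (schema : List Int) (out : List Int) : Decidable (Spec_decode_address addr_int schema out) := by unfold Spec_decode_address; infer_instance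

-- ===== CLAIM (what is proved, stated in full; the proofs are below) =====
def Claim_equal_decode_address : Prop := ∀ (addr_int : Int) (schema : List Int), Dom_decode_address addr_int schema → Pre_decode_address addr_int schema → Spec_decode_address addr_int schema (decode_address addr_int schema)

-- ===== LEMMAS AND PROOFS =====

-- reference shape of A's output: each segment masked after shifting by the suffix bit-sum
def refA (a : Int) : List Int → List Int
  | [] => []
  | b :: rest => PySem.Int.band (a >>> (rest.map Int.toNat).sum) ((1 <<< b.toNat) - 1) :: refA a rest

-- reference shape of B's recursion, read head-first on the REVERSED schema
def refR (v : Int) : List Int → List Int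
  | [] => []
  | b :: rest => PySem.Int.band v ((1 <<< b.toNat) - 1) :: refR (v >>> b.toNat) rest

lemma sum_toNat (l : List Int) (h : ∀ b ∈ l, 0 ≤ b) :
    l.sum.toNat = (l.map Int.toNat).sum := by
  induction l with
  | nil => simp
  | cons b rest ih =>
    have hb : 0 ≤ b := h b (by simp)
    have hs : 0 ≤ rest.sum := List.sum_nonneg (fun x hx => h x (by simp [hx]))
    simp [Int.toNat_add hb hs, ih (fun x hx => h x (by simp [hx]))]

lemma foldA_eq (a : Int) (l : List Int) :
    ∀ (acc : List Int) (s : Int), (∀ b ∈ l, 0 ≤ b) → s = l.sum →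
      (l.foldl (stepA a) (s, acc)).2 = acc ++ refA a l := by
  induction l with
  | nil => simp [refA]
  | cons b rest ih =>
    intro acc s h hs
    have hrest : ∀ x ∈ rest, 0 ≤ x := fun x hx => h x (by simp [hx])
    have hsub : s - b = rest.sum := by rw [hs, List.sum_cons]; ring
    have hnat : (s - b).toNat = (rest.map Int.toNat).sum := by
      rw [hsub, sum_toNat rest hrest]
    simp only [List.foldl_cons, stepA, refA]
    rw [ih _ _ hrest hsub, hnat]
    simp

lemma segmentsB_eq (sch : List Int) : ∀ v : Int,
    segmentsB v sch = (refR v sch.reverse).reverse := by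
  induction sch using List.reverseRecOn with
  | nil => intro v; simp [segmentsB, refR]
  | append_singleton init last ih =>
    intro v
    rw [segmentsB]
    split
    next h => simp at h
    next l h =>
      have hl : last = l := by simpa using h
      subst hl
      simp [ih, refR]

lemma refR_append (xs ys : List Int) : ∀ v : Int,
    refR v (xs ++ ys) = refR v xs ++ refR (v >>> (xs.map Int.toNat).sum) ys := by
  induction xs with
  | nil => intro v; simp [refR]
  | cons x rest ih =>
    intro v
    simp only [List.cons_append, refR, ih, List.map_cons, List.sum_cons]
    rw [Int.shiftRight_add]

lemma refA_eq_refR_reverse (a : Int) (l : List Int) :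
    refA a l = (refR a l.reverse).reverse := by
  induction l with
  | nil => simp [refA, refR]
  | cons b rest ih =>
    simp only [refA, List.reverse_cons, refR_append, refR]
    simp [ih]

-- ===== VERDICT (by name: the statement is the Claim_ definition above) =====
theorem decode_address_spec : Claim_equal_decode_address := by
  intro a schema _ hpre
  unfold Spec_decode_address decode_address decode_address_alt
  obtain ⟨hval, hnn⟩ := hpre
  rw [segmentsB_eq, ← refA_eq_refR_reverse]
  cases schema with
  | nil => simp [refA]
  | cons b rest =>
    have hsum : (if (b :: rest).length == 1 then (20 : Int) else 16) = (b :: rest).sum := by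
      push_neg at hval
      cases rest with
      | nil => simpa using (hval.2 rfl).symm
      | cons c t =>
        have : (b :: c :: t).length > 1 := by simp
        simpa using (hval.1 this).symm
    simp only []
    rw [hsum]
    simpa using foldA_eq a (b :: rest) [] (b :: rest).sum hnn rfl
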